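-- pv_equiv track=rewrite | github.com/Yawn-Sean/Daily_CF_Problems | daily_problems/2025/05/0507/personal_submission/cf245c_liryc.py | solve
-- ===== SOURCE A (Python) =====
-- def solve(n: int, a: list[int]):
--     if n == 1 or not n & 1:
--         return -1
--     ans = 0
--     for r in range(n - 1, -1, -1):
--         if r + 1 << 1 < n:
--             d = max(a[r << 1 | 1], a[r + 1 << 1])
--             a[r << 1 | 1] = a[r + 1 << 1] = 0
--             a[r] = max(a[r] - d, 0)
--             ans += d
--     if a[0]:
--         ans += a[0]
--     return ans
-- ===== SOURCE B (Python) =====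
-- # Pure post-order recursion over the implicit heap tree (children of r at 2r+1, 2r+2):
-- # dfs returns (final value at r, total score of r's subtree); does NOT mutate a
-- # (A zeroes/reduces a in place; only the return value is claimed equivalent).
-- def solve(n: int, a: list[int]):
--     if n == 1 or not n & 1:
--         return -1
--
--     def dfs(r):
--         if 2 * r + 2 >= n:
--             return (a[r], 0)
--         v1, s1 = dfs(2 * r + 1)
--         v2, s2 = dfs(2 * r + 2)
--         d = max(v1, v2)
--         return (max(a[r] - d, 0), s1 + s2 + d)
--
--     v, s = dfs(0)
--     return s + v if v else s
-- ===== Notes on version B (the rewrite author's own statement) =====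
-- stated objective: alternative
-- what changed: A's reverse-index sweep that mutates the array in place (zeroing children and reducing parents while accumulating ans) is replaced by a pure post-order recursion over the implicit binary-heap tree that returns (final node value, subtree score) pairs and never mutates the list.
-- outside the precondition, e.g. on solve(3, [5]): A raises IndexError, B raises IndexError
import Mathlib
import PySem

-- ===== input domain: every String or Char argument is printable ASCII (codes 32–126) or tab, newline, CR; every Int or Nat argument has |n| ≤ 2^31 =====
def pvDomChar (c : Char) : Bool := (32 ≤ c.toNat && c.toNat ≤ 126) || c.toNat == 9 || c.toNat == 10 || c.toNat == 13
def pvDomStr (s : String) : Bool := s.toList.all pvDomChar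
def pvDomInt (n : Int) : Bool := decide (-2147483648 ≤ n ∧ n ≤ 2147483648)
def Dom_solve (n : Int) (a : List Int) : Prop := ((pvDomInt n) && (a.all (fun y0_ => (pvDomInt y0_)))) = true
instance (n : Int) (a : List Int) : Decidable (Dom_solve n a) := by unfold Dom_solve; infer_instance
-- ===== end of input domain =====

-- B replaces A's reverse-index sweep that mutates `a` in place by a pure post-order
-- recursion over the implicit heap tree (objective: alternative decomposition; only the
-- RETURN value is claimed equal — A mutates its list argument, B does not).

-- ===== PORT A =====
-- A's loop body: one iteration of `for r in range(n-1, -1, -1)` over the state (a, ans)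
def solveStepA (n : Int) (st : List Int × Int) (r : Int) : List Int × Int :=
  if (r + 1) <<< (1:Nat) < n then
    let i1 := PySem.Int.bor (r <<< (1:Nat)) 1            -- r << 1 | 1
    let i2 := (r + 1) <<< (1:Nat)                        -- r + 1 << 1
    let d := max (PySem.List.pyGetD st.1 i1 0) (PySem.List.pyGetD st.1 i2 0)
    let l2 := PySem.List.pySetD (PySem.List.pySetD st.1 i1 0) i2 0
    let l3 := PySem.List.pySetD l2 r (max (PySem.List.pyGetD l2 r 0 - d) 0)
    (l3, st.2 + d)
  else st

def solve (n : Int) (a : List Int) : Int :=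
  if n = 1 ∨ PySem.Int.band n 1 = 0 then -1
  else
    let st := (PySem.List.pyRange (n - 1) (-1) (-1)).foldl (solveStepA n) (a, 0)
    if PySem.List.pyGetD st.1 0 0 ≠ 0 then st.2 + PySem.List.pyGetD st.1 0 0 else st.2

-- ===== PORT B =====
-- B's dfs(r): returns (final value at node r, score collected in r's subtree); reads `a` only
-- fuel-guarded structural recursion (fuel n.toNat suffices: r grows at every call and
-- recursion stops once n ≤ r); the fuel is only a totality guard
def solveDfsB (n : Int) (a : List Int) : Nat → Nat → Int × Int
  | 0, r => (PySem.List.pyGetD a (r:Int) 0, 0)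
  | fuel+1, r =>
    if 2 * (r:Int) + 2 < n then
      let p1 := solveDfsB n a fuel (2*r+1)
      let p2 := solveDfsB n a fuel (2*r+2)
      let d := max p1.1 p2.1
      (max (PySem.List.pyGetD a (r:Int) 0 - d) 0, p1.2 + p2.2 + d)
    else (PySem.List.pyGetD a (r:Int) 0, 0)

def solve_alt (n : Int) (a : List Int) : Int :=
  if n = 1 ∨ PySem.Int.band n 1 = 0 then -1
  else
    let vs := solveDfsB n a n.toNat 0
    if vs.1 ≠ 0 then vs.2 + vs.1 else vs.2

-- ===== PRECONDITION & SPEC =====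
-- Pre_ excludes exactly the inputs where A raises IndexError: odd n ≠ 1 with fewer than
-- max(n, 1) elements in a (both programs index a[0..max(n,1)) there).
def Pre_solve (n : Int) (a : List Int) : Prop :=
  n = 1 ∨ PySem.Int.band n 1 = 0 ∨ max n 1 ≤ (a.length : Int)
instance (n : Int) (a : List Int) : Decidable (Pre_solve n a) := by unfold Pre_solve; infer_instance

def pvWitness_solve : Int × List Int := (3, [5, 2, 4])

def Spec_solve (n : Int) (a : List Int) (out : Int) : Prop := out = solve_alt n a
instance (n : Int) (a : List Int) (out : Int) : Decidable (Spec_solve n a out) := by unfold Spec_solve; infer_instance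

-- ===== CLAIM (what is proved, stated in full; the proofs are below) =====
def Claim_equal_solve : Prop := ∀ (n : Int) (a : List Int), Dom_solve n a → Pre_solve n a → Spec_solve n a (solve n a)

-- ===== LEMMAS AND PROOFS =====

-- the result does not depend on the fuel once it covers the remaining depth
theorem dfsB_fuel (n : Int) (a : List Int) :
    ∀ fuel fuel' r : Nat, n.toNat ≤ fuel + r → n.toNat ≤ fuel' + r →
      solveDfsB n a fuel r = solveDfsB n a fuel' r := by
  intro fuel
  induction fuel with
  | zero =>
    intro fuel' r h h'
    have hc : ¬ (2 * (r:Int) + 2 < n) := by omega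
    cases fuel' with
    | zero => rfl
    | succ f' => simp [solveDfsB, hc]
  | succ f ih =>
    intro fuel' r h h'
    by_cases hc : 2 * (r:Int) + 2 < n
    · cases fuel' with
      | zero => omega
      | succ f' =>
        simp only [solveDfsB, if_pos hc]
        rw [ih f' (2*r+1) (by omega) (by omega), ih f' (2*r+2) (by omega) (by omega)]
    · cases fuel' with
      | zero => simp [solveDfsB, hc]
      | succ f' => simp [solveDfsB, hc]

-- proof-side view of B's dfs with a canonical fuel
def dfsF (n : Int) (a : List Int) (r : Nat) : Int × Int := solveDfsB n a (n.toNat - r) r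

theorem dfsB_leaf (n : Int) (a : List Int) (r : Nat) (h : ¬ (2 * (r:Int) + 2 < n)) :
    dfsF n a r = (a.getD r 0, 0) := by
  unfold dfsF
  cases hf : n.toNat - r with
  | zero => simp [solveDfsB]
  | succ f => simp [solveDfsB, h]

theorem dfsB_node (n : Int) (a : List Int) (r : Nat) (h : 2 * (r:Int) + 2 < n) :
    dfsF n a r =
      (max (a.getD r 0 - max (dfsF n a (2*r+1)).1 (dfsF n a (2*r+2)).1) 0,
       (dfsF n a (2*r+1)).2 + (dfsF n a (2*r+2)).2
         + max (dfsF n a (2*r+1)).1 (dfsF n a (2*r+2)).1) := by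
  unfold dfsF
  have hf : n.toNat - r = (n.toNat - r - 1) + 1 := by omega
  rw [hf]
  simp only [solveDfsB, if_pos h]
  rw [dfsB_fuel n a (n.toNat - r - 1) (n.toNat - (2*r+1)) (2*r+1) (by omega) (by omega),
    dfsB_fuel n a (n.toNat - r - 1) (n.toNat - (2*r+2)) (2*r+2) (by omega) (by omega)]
  simp

-- value an entry of the list holds after A has processed all r ≥ m (N := n.toNat):
-- entries with a processed parent are zeroed, other processed entries hold dfs's value
def valSpec (n : Int) (a : List Int) (m i : Nat) : Int :=
  if m ≤ i ∧ i < n.toNat then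
    (if 1 ≤ i ∧ m ≤ (i-1)/2 then 0 else (dfsF n a i).1)
  else a.getD i 0

-- A's accumulator after processing all r ≥ m: the dfs scores of the maximal processed subtrees
def ansSpec (n : Int) (a : List Int) (m : Nat) : Int :=
  ∑ i ∈ Finset.range n.toNat,
    (if m ≤ i ∧ (i = 0 ∨ (i-1)/2 < m) then (dfsF n a i).2 else 0)

theorem shl_one (x : Int) : x <<< (1:Nat) = 2 * x := by
  simp [Int.shiftLeft_eq]; ring

theorem bor_two_mul_one (m : Nat) : PySem.Int.bor ((m:Int) <<< (1:Nat)) 1 = 2*(m:Int)+1 := by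
  rw [shl_one]
  have h1 : (2 * (m:Int)) = ((2*m : Nat) : Int) := by push_cast; ring
  rw [h1]
  have h2 := PySem.Int.bor_natCast (2*m) 1
  rw [show ((1:Nat):Int) = (1:Int) by norm_num] at h2
  rw [h2]
  have h3 : 2*m ||| 1 = 2*m+1 := by
    have h := Nat.lor_bit false m true 0
    simpa [Nat.bit_val] using h
  rw [h3]; push_cast; ring

-- A's loop body at a Nat-valued index, written with List.set / List.getD
theorem stepA_eq (n : Int) (st : List Int × Int) (m : Nat) :
    solveStepA n st (m:Int) =
      if 2*(m:Int)+2 < n then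
        ((((st.1.set (2*m+1) 0).set (2*m+2) 0)).set m
           (max (((st.1.set (2*m+1) 0).set (2*m+2) 0).getD m 0
                  - max (st.1.getD (2*m+1) 0) (st.1.getD (2*m+2) 0)) 0),
         st.2 + max (st.1.getD (2*m+1) 0) (st.1.getD (2*m+2) 0))
      else st := by
  unfold solveStepA
  rw [bor_two_mul_one, shl_one]
  have h1 : 2*(m:Int)+1 = ((2*m+1 : Nat) : Int) := by push_cast; ring
  have h2 : (2:Int)*((m:Int)+1) = ((2*m+2 : Nat) : Int) := by push_cast; ring
  have h3 : 2*(m:Int)+2 = ((2*m+2 : Nat) : Int) := by push_cast; ring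
  rw [h1, h2, h3]
  simp only [PySem.List.pyGetD_natCast, PySem.List.pySetD_natCast]

theorem getD_set_nat (xs : List Int) (j i : Nat) (v d : Int) (hj : j < xs.length) :
    (xs.set j v).getD i d = if i = j then v else xs.getD i d := by
  rcases eq_or_ne i j with rfl | hne
  · simp [List.getD_eq_getElem?_getD, hj]
  · simp [List.getD_eq_getElem?_getD, List.getElem?_set_ne (Ne.symm hne), hne]

-- splitting the countdown range at its last element
theorem range_decomp (n : Int) (m : Nat) (hm : (m:Int) < n) :
    PySem.List.pyRange (n-1) ((m:Int)-1) (-1)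
      = PySem.List.pyRange (n-1) ((m:Int)) (-1) ++ [(m:Int)] := by
  rw [PySem.List.pyRange_neg_one_eq_reverse, PySem.List.pyRange_neg_one_eq_reverse]
  rw [show (m:Int)-1+1 = (m:Int) by ring]
  rw [PySem.List.pyRange_one_cons (by omega : (m:Int) < n-1+1)]
  simp

theorem ansSpec_internal (n : Int) (a : List Int) (m : Nat) (h2 : 2*m+2 < n.toNat)
    (hN : ((n.toNat : Int)) = n) :
    ansSpec n a m = ansSpec n a (m+1)
      + max (dfsF n a (2*m+1)).1 (dfsF n a (2*m+2)).1 := by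
  have hnode := dfsB_node n a m (by omega)
  have key : ∀ i ∈ Finset.range n.toNat,
      (if m ≤ i ∧ (i = 0 ∨ (i-1)/2 < m) then (dfsF n a i).2 else 0)
        = (if m+1 ≤ i ∧ (i = 0 ∨ (i-1)/2 < m+1) then (dfsF n a i).2 else 0)
          + (if i = m then (dfsF n a m).2 else 0)
          - (if i = 2*m+1 then (dfsF n a (2*m+1)).2 else 0)
          - (if i = 2*m+2 then (dfsF n a (2*m+2)).2 else 0) := by
    intro i hi
    simp only [Finset.mem_range] at hi
    by_cases h1 : i = m
    · rw [h1, if_pos (by omega), if_neg (by omega), if_pos rfl,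
        if_neg (by omega), if_neg (by omega)]
      ring
    · by_cases hA : i = 2*m+1
      · rw [hA, if_neg (by omega), if_pos (by omega), if_neg (by omega),
          if_pos rfl, if_neg (by omega)]
        ring
      · by_cases hB : i = 2*m+2
        · rw [hB, if_neg (by omega), if_pos (by omega), if_neg (by omega),
            if_neg (by omega), if_pos rfl]
          ring
        · rw [if_neg h1, if_neg hA, if_neg hB, if_congr (show (m ≤ i ∧ (i = 0 ∨ (i-1)/2 < m)) ↔ (m+1 ≤ i ∧ (i = 0 ∨ (i-1)/2 < m+1)) by omega) rfl rfl]
          ring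
  unfold ansSpec
  rw [Finset.sum_congr rfl key]
  rw [Finset.sum_sub_distrib, Finset.sum_sub_distrib, Finset.sum_add_distrib,
    Finset.sum_ite_eq' (Finset.range n.toNat) m (fun _ => (dfsF n a m).2),
    Finset.sum_ite_eq' (Finset.range n.toNat) (2*m+1) (fun _ => (dfsF n a (2*m+1)).2),
    Finset.sum_ite_eq' (Finset.range n.toNat) (2*m+2) (fun _ => (dfsF n a (2*m+2)).2),
    if_pos (by simp only [Finset.mem_range]; omega),
    if_pos (by simp only [Finset.mem_range]; omega),
    if_pos (by simp only [Finset.mem_range]; omega)]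
  have hv := congrArg Prod.snd hnode
  simp only at hv
  rw [hv]
  ring

theorem ansSpec_leaf (n : Int) (a : List Int) (hoddN : n.toNat % 2 = 1) (m : Nat)
    (h2 : ¬ (2*m+2 < n.toNat)) (hc : ¬ (2*(m:Int)+2 < n)) :
    ansSpec n a m = ansSpec n a (m+1) := by
  apply Finset.sum_congr rfl
  intro i hi
  simp only [Finset.mem_range] at hi
  by_cases h1 : i = m
  · rw [h1, if_pos (by omega), if_neg (by omega)]
    have hv := congrArg Prod.snd (dfsB_leaf n a m hc)
    simp only at hv
    rw [hv]
  · rw [if_congr (show (m ≤ i ∧ (i = 0 ∨ (i-1)/2 < m)) ↔ (m+1 ≤ i ∧ (i = 0 ∨ (i-1)/2 < m+1)) by omega) rfl rfl]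

-- the loop invariant: after processing r = n-1 … m the list holds valSpec and ans holds ansSpec
theorem invA (n : Int) (a : List Int) (hodd : n.toNat % 2 = 1) (h3 : 3 ≤ n)
    (hlen : n ≤ (a.length:Int)) :
    ∀ t : Nat, t ≤ n.toNat →
      (((PySem.List.pyRange (n-1) (((n.toNat - t : Nat):Int)-1) (-1)).foldl
          (solveStepA n) (a, 0)).1.length = a.length) ∧
      (∀ i : Nat, i < a.length →
        ((PySem.List.pyRange (n-1) (((n.toNat - t : Nat):Int)-1) (-1)).foldl
          (solveStepA n) (a, 0)).1.getD i 0 = valSpec n a (n.toNat - t) i) ∧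
      (((PySem.List.pyRange (n-1) (((n.toNat - t : Nat):Int)-1) (-1)).foldl
          (solveStepA n) (a, 0)).2 = ansSpec n a (n.toNat - t)) := by
  have hN : ((n.toNat : Int)) = n := Int.toNat_of_nonneg (by omega)
  have hlenN : n.toNat ≤ a.length := by omega
  intro t
  induction t with
  | zero =>
    intro _
    simp only [Nat.sub_zero]
    rw [PySem.List.pyRange_neg_one_eq_nil (by omega)]
    refine ⟨rfl, ?_, ?_⟩
    · intro i hi
      unfold valSpec
      rw [if_neg (by omega)]
      rfl
    · unfold ansSpec
      rw [Finset.sum_congr rfl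
        (fun i hi => if_neg (by simp only [Finset.mem_range] at hi; omega))]
      simp
  | succ t ih =>
    intro ht
    have IH := ih (by omega)
    set m := n.toNat - (t+1)
    have hmt : n.toNat - t = m + 1 := by omega
    have hmN : m < n.toNat := by omega
    rw [hmt] at IH
    have hcast : (((m+1 : Nat)):Int) - 1 = (m:Int) := by push_cast; ring
    rw [hcast] at IH
    obtain ⟨hL, hval, hans⟩ := IH
    have hmn : (m:Int) < n := by omega
    rw [range_decomp n m hmn, List.foldl_append]
    simp only [List.foldl_cons, List.foldl_nil]
    rw [stepA_eq]
    by_cases hint : 2*(m:Int)+2 < n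
    · -- internal node: children read, zeroed, parent reduced
      have hint2 : 2*m+2 < n.toNat := by omega
      have hnode := dfsB_node n a m hint
      have hr1 : (((PySem.List.pyRange (n-1) ((m:Int)) (-1)).foldl
          (solveStepA n) (a, 0))).1.getD (2*m+1) 0 = (dfsF n a (2*m+1)).1 := by
        rw [hval (2*m+1) (by omega)]
        unfold valSpec
        rw [if_pos (by omega), if_neg (by omega)]
      have hr2 : (((PySem.List.pyRange (n-1) ((m:Int)) (-1)).foldl
          (solveStepA n) (a, 0))).1.getD (2*m+2) 0 = (dfsF n a (2*m+2)).1 := by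
        rw [hval (2*m+2) (by omega)]
        unfold valSpec
        rw [if_pos (by omega), if_neg (by omega)]
      rw [if_pos hint]
      refine ⟨by simp [hL], ?_, ?_⟩
      · intro i hi
        have hrm : ((((PySem.List.pyRange (n-1) ((m:Int)) (-1)).foldl
            (solveStepA n) (a, 0)).1.set (2*m+1) 0).set (2*m+2) 0).getD m 0
              = a.getD m 0 := by
          rw [getD_set_nat _ _ _ _ _ (by simp [hL]; omega), if_neg (by omega),
            getD_set_nat _ _ _ _ _ (by rw [hL]; omega), if_neg (by omega),
            hval m (by omega)]
          unfold valSpec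
          rw [if_neg (by omega)]
        rw [getD_set_nat _ _ _ _ _ (by simp [hL]; omega)]
        by_cases him : i = m
        · rw [if_pos him, hrm, hr1, hr2, him]
          unfold valSpec
          rw [if_pos (by omega), if_neg (by omega)]
          have hv := congrArg Prod.fst hnode
          simp only at hv
          rw [hv]
        · rw [if_neg him, getD_set_nat _ _ _ _ _ (by simp [hL]; omega)]
          by_cases hB : i = 2*m+2
          · rw [if_pos hB, hB]
            unfold valSpec
            rw [if_pos (by omega), if_pos (by omega)]
          · rw [if_neg hB, getD_set_nat _ _ _ _ _ (by rw [hL]; omega)]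
            by_cases hA : i = 2*m+1
            · rw [if_pos hA, hA]
              unfold valSpec
              rw [if_pos (by omega), if_pos (by omega)]
            · rw [if_neg hA, hval i hi]
              unfold valSpec
              by_cases hin : m ≤ i ∧ i < n.toNat
              · rw [if_pos (by omega), if_pos hin]
                exact if_congr (by omega) rfl rfl
              · rw [if_neg (by omega), if_neg hin]
      · rw [hr1, hr2, hans, ansSpec_internal n a m hint2 hN]
    · -- leaf: the iteration does nothing
      have hint2 : ¬ (2*m+2 < n.toNat) := by omega
      rw [if_neg hint]
      refine ⟨hL, ?_, ?_⟩
      · intro i hi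
        rw [hval i hi]
        unfold valSpec
        by_cases him : i = m
        · rw [him, if_neg (by omega), if_pos (by omega), if_neg (by omega)]
          have hv := congrArg Prod.fst (dfsB_leaf n a m hint)
          simp only at hv
          rw [hv]
        · by_cases hin : m ≤ i ∧ i < n.toNat
          · rw [if_pos (by omega), if_pos hin]
            exact if_congr (by omega) rfl rfl
          · rw [if_neg (by omega), if_neg hin]
      · rw [hans]
        exact (ansSpec_leaf n a hodd m hint2 hint).symm

theorem ansSpec_zero (n : Int) (a : List Int) (hpos : 0 < n.toNat) :
    ansSpec n a 0 = (dfsF n a 0).2 := by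
  unfold ansSpec
  have h : ∀ i ∈ Finset.range n.toNat,
      (if 0 ≤ i ∧ (i = 0 ∨ (i-1)/2 < 0) then (dfsF n a i).2 else 0)
        = if i = 0 then (dfsF n a i).2 else 0 := by
    intro i _
    split_ifs <;> first | rfl | omega
  rw [Finset.sum_congr rfl h,
    Finset.sum_ite_eq' (Finset.range n.toNat) 0 (fun i => (dfsF n a i).2)]
  simp [Finset.mem_range, hpos]

-- ===== VERDICT (by name: the statement is the Claim_ definition above) =====
theorem solve_spec : Claim_equal_solve := by
  intro n a _ hpre
  unfold Spec_solve solve solve_alt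
  by_cases hg : n = 1 ∨ PySem.Int.band n 1 = 0
  · simp [hg]
  · simp only [hg, if_false]
    rw [not_or] at hg
    obtain ⟨hn1, hband⟩ := hg
    have hb : PySem.Int.band n 1 = PySem.Int.mod n 2 := PySem.Int.band_one n
    have hm2 : PySem.Int.mod n 2 = n % 2 := PySem.Int.mod_eq_emod_of_pos (by norm_num)
    have hodd : n % 2 = 1 := by
      rw [hb, hm2] at hband
      omega
    rcases Int.lt_or_le n 0 with hneg | hpos
    · have hr : PySem.List.pyRange (n-1) (-1) (-1) = ([] : List Int) :=
        PySem.List.pyRange_neg_one_eq_nil (by omega)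
      rw [hr]
      have hF : dfsF n a 0 = solveDfsB n a n.toNat 0 := rfl
      rw [← hF, dfsB_leaf n a 0 (by push_cast; omega)]
      simp [PySem.List.pyGetD_zero]
    · have h3 : 3 ≤ n := by omega
      have hlen : n ≤ (a.length:Int) := by
        unfold Pre_solve at hpre
        rcases hpre with h | h | h
        · omega
        · rw [PySem.Int.band_one n, PySem.Int.mod_eq_emod_of_pos (by norm_num)] at h
          omega
        · omega
      have hoddN : n.toNat % 2 = 1 := by omega
      have hinv := invA n a hoddN h3 hlen n.toNat le_rfl
      rw [Nat.sub_self] at hinv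
      rw [show (((0:Nat):Int) - 1) = (-1:Int) by norm_num] at hinv
      obtain ⟨hL, hval, hans⟩ := hinv
      have h0len : 0 < a.length := by omega
      have hv0 := hval 0 h0len
      have hvs : valSpec n a 0 0 = (dfsF n a 0).1 := by
        unfold valSpec
        simp only [if_pos (show 0 ≤ 0 ∧ 0 < n.toNat by omega)]
        simp
      rw [hvs] at hv0
      have hF : dfsF n a 0 = solveDfsB n a n.toNat 0 := rfl
      rw [← hF, PySem.List.pyGetD_zero, hv0, hans, ansSpec_zero n a (by omega)]
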